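-- pv_equiv track=rewrite | github.com/nbratek/WDI | zestaw 6/zad21.py | check
-- ===== SOURCE A (Python) =====
-- def check(T, s, n_s, i, j, wiersze, kolumny):
--     if n_s == s:
--         return True
--     if n_s > s:
--         return False
--     if j >= len(T):
--         i += 1
--         j = 0
--     if i >= len(T):
--         return False
--     if wiersze[i] is False and kolumny[j] is False:
--         wiersze[i] = True
--         kolumny[j] = True
--         if check(T, s, n_s + T[i][j], i, j + 1, wiersze, kolumny):
--             return True
--         wiersze[i] = kolumny[j] = False
--     if check(T, s, n_s, i, j + 1, wiersze, kolumny):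
--         return True
--     return False
-- ===== SOURCE B (Python) =====
-- def check(T, s, n_s, i, j, wiersze, kolumny):
--     n = len(T)
--
--     def go(total, i, j, rows, cols):
--         if total == s:
--             return True
--         if total > s:
--             return False
--         if i >= n:
--             return False
--         if not rows[i]:
--             for c in range(j, n):
--                 if not cols[c]:
--                     t2 = total + T[i][c]
--                     if t2 == s:
--                         return True
--                     if t2 < s and go(t2, i + 1, 0,
--                                      rows[:i] + [True] + rows[i+1:],
--                                      cols[:c] + [True] + cols[c+1:]):
--                         return True
--         return go(total, i + 1, 0, rows, cols)
--
--     if n_s == s: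
--         return True
--     if n_s > s:
--         return False
--     if j >= n:
--         i, j = i + 1, 0
--     return go(n_s, i, j, wiersze, kolumny)
-- ===== Notes on version B (the rewrite author's own statement) =====
-- stated objective: alternative
-- what changed: B replaces A's per-cell pick/skip recursion with in-place marking and backtracking by a per-row recursion with an inner column loop over immutable list copies (skip the row, or pick a free column and drop straight to the next row); equivalence is about the return value only (A leaves marks in wiersze/kolumny on success, B never mutates them).
-- outside the precondition, e.g. on check([[1]], 5, 0, -1, 0, [False], [False]): A returns False, B returns False; on check([[2, 3], [4, 5]], 7, 0, -2, 0, [False, False], [False, False]): A returns True, B returns True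
import Mathlib
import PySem

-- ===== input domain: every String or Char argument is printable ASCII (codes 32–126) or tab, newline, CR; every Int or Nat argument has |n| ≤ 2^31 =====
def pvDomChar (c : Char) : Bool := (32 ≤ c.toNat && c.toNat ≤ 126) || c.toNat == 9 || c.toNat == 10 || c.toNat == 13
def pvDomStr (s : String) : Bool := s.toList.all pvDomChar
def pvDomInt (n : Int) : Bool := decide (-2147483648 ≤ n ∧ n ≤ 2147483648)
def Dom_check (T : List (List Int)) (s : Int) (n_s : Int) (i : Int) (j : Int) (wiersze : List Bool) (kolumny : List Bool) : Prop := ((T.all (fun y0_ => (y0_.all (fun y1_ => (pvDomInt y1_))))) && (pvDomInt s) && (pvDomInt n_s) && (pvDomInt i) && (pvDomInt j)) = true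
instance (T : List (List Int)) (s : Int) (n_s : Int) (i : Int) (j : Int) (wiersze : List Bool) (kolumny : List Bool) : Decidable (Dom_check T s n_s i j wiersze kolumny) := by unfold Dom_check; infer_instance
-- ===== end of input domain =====

-- B replaces A's per-cell pick/skip recursion (with in-place marking and backtracking) by a
-- per-row recursion with an inner column loop over immutable copies; equivalence is about the
-- RETURN value only: A mutates wiersze/kolumny (marks are left on success), B leaves them unchanged.
-- Both ports carry an extra Nat fuel argument as a totality guard only: the fuel is computed from
-- the input (muA below bounds the recursion depth) and never runs out (checkF_irrel / BF_irrel).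

-- fuel bound shared by both ports: an upper bound on how far the (i, j) scan can still run
def muA (T : List (List Int)) (i j : Int) : Nat :=
  ((T.length : Int) - i).toNat * (T.length + 2) + ((T.length : Int) - j).toNat

-- ===== PORT A =====
-- Python's 'if j >= len(T): i += 1; j = 0' reassignment is transliterated by duplicating the
-- remaining body under both branches (once with (i+1, 0), once with (i, j)).
def checkF : Nat → List (List Int) → Int → Int → Int → Int → List Bool → List Bool → Bool
  | 0, _, _, _, _, _, _, _ => false
  | fu+1, T, s, n_s, i, j, wiersze, kolumny =>
    if n_s = s then true
    else if n_s > s then false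
    else if j ≥ (T.length : Int) then
      if i + 1 ≥ (T.length : Int) then false
      else if PySem.List.pyGetD wiersze (i+1) true = false ∧ PySem.List.pyGetD kolumny 0 true = false then
        if checkF fu T s (n_s + PySem.List.pyGetD (PySem.List.pyGetD T (i+1) []) 0 0) (i+1) (0+1)
             (PySem.List.pySetD wiersze (i+1) true) (PySem.List.pySetD kolumny 0 true) then true
        else if checkF fu T s n_s (i+1) (0+1) wiersze kolumny then true
        else false
      else if checkF fu T s n_s (i+1) (0+1) wiersze kolumny then true
      else false
    else
      if i ≥ (T.length : Int) then false
      else if PySem.List.pyGetD wiersze i true = false ∧ PySem.List.pyGetD kolumny j true = false then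
        if checkF fu T s (n_s + PySem.List.pyGetD (PySem.List.pyGetD T i []) j 0) i (j+1)
             (PySem.List.pySetD wiersze i true) (PySem.List.pySetD kolumny j true) then true
        else if checkF fu T s n_s i (j+1) wiersze kolumny then true
        else false
      else if checkF fu T s n_s i (j+1) wiersze kolumny then true
      else false

def check (T : List (List Int)) (s : Int) (n_s : Int) (i : Int) (j : Int) (wiersze : List Bool) (kolumny : List Bool) : Bool :=
  checkF (muA T i j + 1) T s n_s i j wiersze kolumny

-- ===== PORT B =====
-- goF = Source B's inner 'go'; tryColsF = its 'for c in range(j, n)' loop.  The 'i ≥ len' disjunct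
-- in tryColsF's guard mirrors go's own 'i >= n' early return (go enters the loop only with i < n).
mutual
def goF : Nat → List (List Int) → Int → Int → Int → Int → List Bool → List Bool → Bool
  | 0, _, _, _, _, _, _, _ => false
  | fu+1, T, s, total, i, j, rows, cols =>
    if total = s then true
    else if total > s then false
    else if i ≥ (T.length : Int) then false
    else
      (if PySem.List.pyGetD rows i true = false then tryColsF fu T s total i j rows cols else false)
        || goF fu T s total (i+1) 0 rows cols

def tryColsF : Nat → List (List Int) → Int → Int → Int → Int → List Bool → List Bool → Bool
  | 0, _, _, _, _, _, _, _ => false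
  | fu+1, T, s, total, i, c, rows, cols =>
    if c ≥ (T.length : Int) ∨ i ≥ (T.length : Int) then false
    else if PySem.List.pyGetD cols c true = false then
      if total + PySem.List.pyGetD (PySem.List.pyGetD T i []) c 0 = s then true
      else if (total + PySem.List.pyGetD (PySem.List.pyGetD T i []) c 0 < s) ∧
              goF fu T s (total + PySem.List.pyGetD (PySem.List.pyGetD T i []) c 0) (i+1) 0
                 (PySem.List.pySetD rows i true) (PySem.List.pySetD cols c true) = true then true
      else tryColsF fu T s total i (c+1) rows cols
    else tryColsF fu T s total i (c+1) rows cols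
end

def go (T : List (List Int)) (s : Int) (total : Int) (i : Int) (j : Int) (rows : List Bool) (cols : List Bool) : Bool :=
  goF (2 * muA T i j + 1 + 1) T s total i j rows cols

def check_alt (T : List (List Int)) (s : Int) (n_s : Int) (i : Int) (j : Int) (wiersze : List Bool) (kolumny : List Bool) : Bool :=
  if n_s = s then true
  else if n_s > s then false
  else if j ≥ (T.length : Int) then go T s n_s (i+1) 0 wiersze kolumny
  else go T s n_s i j wiersze kolumny

-- ===== PRECONDITION & SPEC =====
-- Pre_ excludes inputs outside the function's natural call pattern — negative start indices
-- (Python indexes wiersze/kolumny/T from the end there) and boards where a row or the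
-- wiersze/kolumny lists are shorter than len(T) (A can raise IndexError) — except when one of
-- A's early returns (n_s == s, n_s > s, start row already past the board) decides without indexing.
def Pre_check (T : List (List Int)) (s : Int) (n_s : Int) (i : Int) (j : Int) (wiersze : List Bool) (kolumny : List Bool) : Prop :=
  n_s = s ∨ n_s > s ∨ ((if j ≥ (T.length : Int) then i + 1 else i) ≥ (T.length : Int)) ∨
  (0 ≤ i ∧ 0 ≤ j ∧ T.length ≤ wiersze.length ∧ T.length ≤ kolumny.length ∧
    ∀ r ∈ T, T.length ≤ r.length)
instance (T : List (List Int)) (s : Int) (n_s : Int) (i : Int) (j : Int) (wiersze : List Bool) (kolumny : List Bool) : Decidable (Pre_check T s n_s i j wiersze kolumny) := by unfold Pre_check; infer_instance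

def pvWitness_check : List (List Int) × Int × Int × Int × Int × List Bool × List Bool :=
  ([[1, 2], [3, 4]], 5, 0, 0, 0, [false, false], [false, false])

def Spec_check (T : List (List Int)) (s : Int) (n_s : Int) (i : Int) (j : Int) (wiersze : List Bool) (kolumny : List Bool) (out : Bool) : Prop := out = check_alt T s n_s i j wiersze kolumny
instance (T : List (List Int)) (s : Int) (n_s : Int) (i : Int) (j : Int) (wiersze : List Bool) (kolumny : List Bool) (out : Bool) : Decidable (Spec_check T s n_s i j wiersze kolumny out) := by unfold Spec_check; infer_instance

-- ===== CLAIM (what is proved, stated in full; the proofs are below) =====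
def Claim_equal_check : Prop := ∀ (T : List (List Int)) (s : Int) (n_s : Int) (i : Int) (j : Int) (wiersze : List Bool) (kolumny : List Bool), Dom_check T s n_s i j wiersze kolumny → Pre_check T s n_s i j wiersze kolumny → Spec_check T s n_s i j wiersze kolumny (check T s n_s i j wiersze kolumny)

-- ===== LEMMAS AND PROOFS =====

-- proof-side abbreviation for Source B's column loop at its canonical fuel
def tryCols (T : List (List Int)) (s : Int) (total : Int) (i : Int) (c : Int) (rows : List Bool) (cols : List Bool) : Bool :=
  tryColsF (2 * muA T i c + 1) T s total i c rows cols


-- one-step unfoldings of the fueled recursions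
theorem checkF_succ (fu : Nat) (T : List (List Int)) (s t i j : Int) (w k : List Bool) :
    checkF (fu+1) T s t i j w k =
    (if t = s then true
    else if t > s then false
    else if j ≥ (T.length : Int) then
      if i + 1 ≥ (T.length : Int) then false
      else if PySem.List.pyGetD w (i+1) true = false ∧ PySem.List.pyGetD k 0 true = false then
        if checkF fu T s (t + PySem.List.pyGetD (PySem.List.pyGetD T (i+1) []) 0 0) (i+1) (0+1)
             (PySem.List.pySetD w (i+1) true) (PySem.List.pySetD k 0 true) then true
        else if checkF fu T s t (i+1) (0+1) w k then true
        else false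
      else if checkF fu T s t (i+1) (0+1) w k then true
      else false
    else
      if i ≥ (T.length : Int) then false
      else if PySem.List.pyGetD w i true = false ∧ PySem.List.pyGetD k j true = false then
        if checkF fu T s (t + PySem.List.pyGetD (PySem.List.pyGetD T i []) j 0) i (j+1)
             (PySem.List.pySetD w i true) (PySem.List.pySetD k j true) then true
        else if checkF fu T s t i (j+1) w k then true
        else false
      else if checkF fu T s t i (j+1) w k then true
      else false) := rfl

theorem goF_succ (fu : Nat) (T : List (List Int)) (s t i j : Int) (w k : List Bool) :
    goF (fu+1) T s t i j w k =
    (if t = s then true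
    else if t > s then false
    else if i ≥ (T.length : Int) then false
    else
      (if PySem.List.pyGetD w i true = false then tryColsF fu T s t i j w k else false)
        || goF fu T s t (i+1) 0 w k) := rfl

theorem tryColsF_succ (fu : Nat) (T : List (List Int)) (s t i c : Int) (w k : List Bool) :
    tryColsF (fu+1) T s t i c w k =
    (if c ≥ (T.length : Int) ∨ i ≥ (T.length : Int) then false
    else if PySem.List.pyGetD k c true = false then
      if t + PySem.List.pyGetD (PySem.List.pyGetD T i []) c 0 = s then true
      else if (t + PySem.List.pyGetD (PySem.List.pyGetD T i []) c 0 < s) ∧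
              goF fu T s (t + PySem.List.pyGetD (PySem.List.pyGetD T i []) c 0) (i+1) 0
                 (PySem.List.pySetD w i true) (PySem.List.pySetD k c true) = true then true
      else tryColsF fu T s t i (c+1) w k
    else tryColsF fu T s t i (c+1) w k) := rfl

-- arithmetic of the fuel bound
theorem muA_col (T : List (List Int)) (i : Int) {j : Int} (h : j < (T.length : Int)) :
    muA T i j = muA T i (j+1) + 1 := by
  unfold muA; omega

theorem muA_drop (T : List (List Int)) {i : Int} (j : Int) (h : i < (T.length : Int)) :
    muA T (i+1) 0 + 2 ≤ muA T i j := by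
  unfold muA
  have h1 : ((T.length : Int) - i).toNat = ((T.length : Int) - (i+1)).toNat + 1 := by omega
  rw [h1, Nat.succ_mul]
  omega

-- the fuel never matters as long as it exceeds the depth bound
theorem checkF_irrel (T : List (List Int)) (s : Int) : ∀ (f g : Nat) (t i j : Int) (w k : List Bool),
    muA T i j < f → muA T i j < g → checkF f T s t i j w k = checkF g T s t i j w k := by
  intro f
  induction f using Nat.strong_induction_on with
  | _ f IH =>
    intro g t i j w k hf hg
    obtain ⟨fu, rfl⟩ : ∃ fu, f = fu + 1 := ⟨f - 1, by omega⟩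
    obtain ⟨gu, rfl⟩ : ∃ gu, g = gu + 1 := ⟨g - 1, by omega⟩
    rw [checkF_succ, checkF_succ]
    by_cases ht : t = s
    · rw [if_pos ht, if_pos ht]
    rw [if_neg ht, if_neg ht]
    by_cases hgt : t > s
    · rw [if_pos hgt, if_pos hgt]
    rw [if_neg hgt, if_neg hgt]
    by_cases hj : j ≥ (T.length : Int)
    · rw [if_pos hj, if_pos hj]
      by_cases hi : i + 1 ≥ (T.length : Int)
      · rw [if_pos hi, if_pos hi]
      rw [if_neg hi, if_neg hi]
      have hstep : muA T (i+1) (0+1) < muA T i j := by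
        have h1 : ((T.length : Int) - i).toNat = ((T.length : Int) - (i+1)).toNat + 1 := by omega
        unfold muA; rw [h1, Nat.succ_mul]; omega
      have e1 : checkF fu T s (t + PySem.List.pyGetD (PySem.List.pyGetD T (i+1) []) 0 0) (i+1) (0+1)
            (PySem.List.pySetD w (i+1) true) (PySem.List.pySetD k 0 true)
          = checkF gu T s (t + PySem.List.pyGetD (PySem.List.pyGetD T (i+1) []) 0 0) (i+1) (0+1)
            (PySem.List.pySetD w (i+1) true) (PySem.List.pySetD k 0 true) :=
        IH fu (by omega) gu _ _ _ _ _ (by omega) (by omega)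
      have e2 : checkF fu T s t (i+1) (0+1) w k = checkF gu T s t (i+1) (0+1) w k :=
        IH fu (by omega) gu _ _ _ _ _ (by omega) (by omega)
      rw [e1, e2]
    rw [if_neg hj, if_neg hj]
    by_cases hi : i ≥ (T.length : Int)
    · rw [if_pos hi, if_pos hi]
    rw [if_neg hi, if_neg hi]
    have hb := muA_col T i (by omega : j < (T.length : Int))
    have e1 : checkF fu T s (t + PySem.List.pyGetD (PySem.List.pyGetD T i []) j 0) i (j+1)
          (PySem.List.pySetD w i true) (PySem.List.pySetD k j true)
        = checkF gu T s (t + PySem.List.pyGetD (PySem.List.pyGetD T i []) j 0) i (j+1)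
          (PySem.List.pySetD w i true) (PySem.List.pySetD k j true) :=
      IH fu (by omega) gu _ _ _ _ _ (by omega) (by omega)
    have e2 : checkF fu T s t i (j+1) w k = checkF gu T s t i (j+1) w k :=
      IH fu (by omega) gu _ _ _ _ _ (by omega) (by omega)
    rw [e1, e2]

theorem BF_irrel (T : List (List Int)) (s : Int) : ∀ (f : Nat),
    (∀ (g : Nat) (t i j : Int) (w k : List Bool), 2 * muA T i j + 1 < f → 2 * muA T i j + 1 < g →
      goF f T s t i j w k = goF g T s t i j w k) ∧
    (∀ (g : Nat) (t i c : Int) (w k : List Bool), 2 * muA T i c < f → 2 * muA T i c < g →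
      tryColsF f T s t i c w k = tryColsF g T s t i c w k) := by
  intro f
  induction f using Nat.strong_induction_on with
  | _ f IH =>
    constructor
    · intro g t i j w k hf hg
      obtain ⟨fu, rfl⟩ : ∃ fu, f = fu + 1 := ⟨f - 1, by omega⟩
      obtain ⟨gu, rfl⟩ : ∃ gu, g = gu + 1 := ⟨g - 1, by omega⟩
      rw [goF_succ, goF_succ]
      by_cases ht : t = s
      · rw [if_pos ht, if_pos ht]
      rw [if_neg ht, if_neg ht]
      by_cases hgt : t > s
      · rw [if_pos hgt, if_pos hgt]
      rw [if_neg hgt, if_neg hgt]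
      by_cases hi : i ≥ (T.length : Int)
      · rw [if_pos hi, if_pos hi]
      rw [if_neg hi, if_neg hi]
      have hd := muA_drop T j (by omega : i < (T.length : Int))
      have e1 : tryColsF fu T s t i j w k = tryColsF gu T s t i j w k :=
        (IH fu (by omega)).2 gu t i j w k (by omega) (by omega)
      have e2 : goF fu T s t (i+1) 0 w k = goF gu T s t (i+1) 0 w k :=
        (IH fu (by omega)).1 gu t (i+1) 0 w k (by omega) (by omega)
      rw [e1, e2]
    · intro g t i c w k hf hg
      obtain ⟨fu, rfl⟩ : ∃ fu, f = fu + 1 := ⟨f - 1, by omega⟩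
      obtain ⟨gu, rfl⟩ : ∃ gu, g = gu + 1 := ⟨g - 1, by omega⟩
      rw [tryColsF_succ, tryColsF_succ]
      by_cases hgd : c ≥ (T.length : Int) ∨ i ≥ (T.length : Int)
      · rw [if_pos hgd, if_pos hgd]
      rw [if_neg hgd, if_neg hgd]
      have hd := muA_drop T c (by omega : i < (T.length : Int))
      have hcc := muA_col T i (by omega : c < (T.length : Int))
      have e1 : goF fu T s (t + PySem.List.pyGetD (PySem.List.pyGetD T i []) c 0) (i+1) 0
            (PySem.List.pySetD w i true) (PySem.List.pySetD k c true)
          = goF gu T s (t + PySem.List.pyGetD (PySem.List.pyGetD T i []) c 0) (i+1) 0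
            (PySem.List.pySetD w i true) (PySem.List.pySetD k c true) :=
        (IH fu (by omega)).1 gu _ _ _ _ _ (by omega) (by omega)
      have e2 : tryColsF fu T s t i (c+1) w k = tryColsF gu T s t i (c+1) w k :=
        (IH fu (by omega)).2 gu t i (c+1) w k (by omega) (by omega)
      simp only [e1, e2]

theorem go_ge (T : List (List Int)) (s t i j : Int) (w k : List Bool)
    (ht : t ≠ s) (hgt : ¬ t > s) (hi : (T.length : Int) ≤ i) :
    go T s t i j w k = false := by
  unfold go
  rw [goF_succ, if_neg ht, if_neg hgt, if_pos hi]

theorem go_lt (T : List (List Int)) (s t i j : Int) (w k : List Bool)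
    (ht : t ≠ s) (hgt : ¬ t > s) (hi : i < (T.length : Int)) :
    go T s t i j w k =
      ((if PySem.List.pyGetD w i true = false then tryCols T s t i j w k else false)
        || go T s t (i+1) 0 w k) := by
  unfold go tryCols
  rw [goF_succ, if_neg ht, if_neg hgt, if_neg (by omega : ¬ (T.length : Int) ≤ i)]
  have hd := muA_drop T j hi
  have e2 : goF (2 * muA T i j + 1) T s t (i+1) 0 w k
      = goF (2 * muA T (i+1) 0 + 1 + 1) T s t (i+1) 0 w k :=
    (BF_irrel T s _).1 _ t (i+1) 0 w k (by omega) (by omega)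
  rw [e2]

theorem tryCols_ge (T : List (List Int)) (s t i c : Int) (w k : List Bool)
    (hc : (T.length : Int) ≤ c) :
    tryCols T s t i c w k = false := by
  unfold tryCols
  rw [tryColsF_succ, if_pos (Or.inl hc)]

theorem tryCols_lt (T : List (List Int)) (s t i c : Int) (w k : List Bool)
    (hc : c < (T.length : Int)) (hi : i < (T.length : Int)) :
    tryCols T s t i c w k =
      (if PySem.List.pyGetD k c true = false then
        if t + PySem.List.pyGetD (PySem.List.pyGetD T i []) c 0 = s then true
        else if (t + PySem.List.pyGetD (PySem.List.pyGetD T i []) c 0 < s) ∧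
                go T s (t + PySem.List.pyGetD (PySem.List.pyGetD T i []) c 0) (i+1) 0
                   (PySem.List.pySetD w i true) (PySem.List.pySetD k c true) = true then true
        else tryCols T s t i (c+1) w k
      else tryCols T s t i (c+1) w k) := by
  unfold tryCols go
  rw [tryColsF_succ, if_neg (by omega : ¬ ((T.length : Int) ≤ c ∨ (T.length : Int) ≤ i))]
  have hd := muA_drop T c hi
  have hcc := muA_col T i hc
  have e1 : goF (2 * muA T i c) T s (t + PySem.List.pyGetD (PySem.List.pyGetD T i []) c 0) (i+1) 0
        (PySem.List.pySetD w i true) (PySem.List.pySetD k c true)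
      = goF (2 * muA T (i+1) 0 + 1 + 1) T s (t + PySem.List.pyGetD (PySem.List.pyGetD T i []) c 0) (i+1) 0
        (PySem.List.pySetD w i true) (PySem.List.pySetD k c true) :=
    (BF_irrel T s _).1 _ _ (i+1) 0 _ _ (by omega) (by omega)
  have e2 : tryColsF (2 * muA T i c) T s t i (c+1) w k
      = tryColsF (2 * muA T i (c+1) + 1) T s t i (c+1) w k :=
    (BF_irrel T s _).2 _ t i (c+1) w k (by omega) (by omega)
  simp only [e1, e2]

-- B after a skip to the next column: check_alt at (i, j+1) in row i.
theorem skip_eq (T : List (List Int)) (s t i j : Int) (w k : List Bool)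
    (ht : t ≠ s) (hgt : ¬ t > s) (hi : i < (T.length : Int)) :
    check_alt T s t i (j+1) w k =
      ((if PySem.List.pyGetD w i true = false then tryCols T s t i (j+1) w k else false)
        || go T s t (i+1) 0 w k) := by
  unfold check_alt
  rw [if_neg ht, if_neg hgt]
  by_cases hjn : (T.length : Int) ≤ j + 1
  · rw [if_pos hjn, tryCols_ge T s t i (j+1) w k hjn]
    simp
  · rw [if_neg hjn, go_lt T s t i (j+1) w k ht hgt hi]

-- B after a pick: the picked row is marked, so check_alt at (i, j+1) drops to row i+1.
theorem pick_eq (T : List (List Int)) (s t2 i j : Int) (w' k' : List Bool)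
    (hwi : PySem.List.pyGetD w' i true = true) (hi : i < (T.length : Int)) :
    check_alt T s t2 i (j+1) w' k' =
      (if t2 = s then true else if t2 > s then false else go T s t2 (i+1) 0 w' k') := by
  unfold check_alt
  by_cases ht : t2 = s
  · simp [ht]
  · rw [if_neg ht]
    by_cases hgt : t2 > s
    · simp [ht, hgt]
    · rw [if_neg hgt, if_neg ht, if_neg hgt]
      by_cases hjn : (T.length : Int) ≤ j + 1
      · rw [if_pos hjn]
      · rw [if_neg hjn, go_lt T s t2 i (j+1) w' k' ht hgt hi, hwi]
        simp

-- A with j past the row end behaves like A restarted at (i+1, 0).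
theorem check_adjust (T : List (List Int)) (s t i j : Int) (w k : List Bool)
    (ht : t ≠ s) (hgt : ¬ t > s) (hj : (T.length : Int) ≤ j) (h0i : 0 ≤ i) :
    check T s t i j w k = check T s t (i+1) 0 w k := by
  unfold check
  rw [checkF_succ, checkF_succ]
  rw [if_neg ht, if_neg hgt, if_neg ht, if_neg hgt, if_pos hj]
  by_cases hn : (T.length : Int) ≤ 0
  · rw [if_pos hn, if_pos (by omega : i + 1 ≥ (T.length : Int)),
      if_pos (by omega : i + 1 + 1 ≥ (T.length : Int))]
  · rw [if_neg hn]
    by_cases hii : i + 1 ≥ (T.length : Int)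
    · rw [if_pos hii, if_pos hii]
    · rw [if_neg hii, if_neg hii]
      have hd := muA_drop T j (by omega : i < (T.length : Int))
      have hc := muA_col T (i+1) (by omega : (0:Int) < (T.length : Int))
      have e1 : checkF (muA T i j) T s (t + PySem.List.pyGetD (PySem.List.pyGetD T (i+1) []) 0 0) (i+1) (0+1)
            (PySem.List.pySetD w (i+1) true) (PySem.List.pySetD k 0 true)
          = checkF (muA T (i+1) 0) T s (t + PySem.List.pyGetD (PySem.List.pyGetD T (i+1) []) 0 0) (i+1) (0+1)
            (PySem.List.pySetD w (i+1) true) (PySem.List.pySetD k 0 true) :=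
        checkF_irrel T s _ _ _ _ _ _ _ (by omega) (by omega)
      have e2 : checkF (muA T i j) T s t (i+1) (0+1) w k
          = checkF (muA T (i+1) 0) T s t (i+1) (0+1) w k :=
        checkF_irrel T s _ _ _ _ _ _ _ (by omega) (by omega)
      rw [e1, e2]

theorem check_alt_adjust (T : List (List Int)) (s t i j : Int) (w k : List Bool)
    (ht : t ≠ s) (hgt : ¬ t > s) (hj : (T.length : Int) ≤ j) (h0i : 0 ≤ i) :
    check_alt T s t i j w k = check_alt T s t (i+1) 0 w k := by
  unfold check_alt
  rw [if_neg ht, if_neg hgt, if_neg ht, if_neg hgt, if_pos hj]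
  by_cases hn : (T.length : Int) ≤ 0
  · rw [if_pos hn, go_ge T s t (i+1) 0 w k ht hgt (by omega),
      go_ge T s t (i+1+1) 0 w k ht hgt (by omega)]
  · rw [if_neg hn]

theorem check_main (T : List (List Int)) (s : Int) (N : Nat) :
    ∀ (t i j : Int) (w k : List Bool),
      muA T i j ≤ N →
      0 ≤ i → 0 ≤ j → T.length ≤ w.length → T.length ≤ k.length →
      (∀ r ∈ T, T.length ≤ r.length) →
      check T s t i j w k = check_alt T s t i j w k := by
  induction N using Nat.strong_induction_on with
  | _ N IH =>
    intro t i j w k hμ h0i h0j hw hk hT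
    by_cases ht : t = s
    · unfold check; rw [checkF_succ, if_pos ht]; unfold check_alt; rw [if_pos ht]
    by_cases hgt : t > s
    · unfold check; rw [checkF_succ, if_neg ht, if_pos hgt]
      unfold check_alt; rw [if_neg ht, if_pos hgt]
    by_cases hj : (T.length : Int) ≤ j
    · -- column index past the end: both sides restart at (i+1, 0)
      rw [check_adjust T s t i j w k ht hgt hj h0i,
        check_alt_adjust T s t i j w k ht hgt hj h0i]
      by_cases hi : (T.length : Int) ≤ i + 1
      · have hA : check T s t (i+1) 0 w k = false := by
          unfold check
          rw [checkF_succ, if_neg ht, if_neg hgt]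
          by_cases hn : (T.length : Int) ≤ 0
          · rw [if_pos hn, if_pos (by omega : i + 1 + 1 ≥ (T.length : Int))]
          · rw [if_neg hn, if_pos hi]
        have hB : check_alt T s t (i+1) 0 w k = false := by
          unfold check_alt
          rw [if_neg ht, if_neg hgt]
          by_cases hn : (T.length : Int) ≤ 0
          · rw [if_pos hn, go_ge T s t (i+1+1) 0 w k ht hgt (by omega)]
          · rw [if_neg hn, go_ge T s t (i+1) 0 w k ht hgt hi]
        rw [hA, hB]
      · have hd := muA_drop T j (by omega : i < (T.length : Int))
        exact IH (muA T (i+1) 0) (by omega) t (i+1) 0 w k le_rfl (by omega) le_rfl hw hk hT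
    · by_cases hi : (T.length : Int) ≤ i
      · unfold check
        rw [checkF_succ, if_neg ht, if_neg hgt, if_neg hj, if_pos hi]
        unfold check_alt
        rw [if_neg ht, if_neg hgt, if_neg hj, go_ge T s t i j w k ht hgt hi]
      · -- the interesting case: 0 ≤ i < n, 0 ≤ j < n
        have hin : i < (T.length : Int) := by omega
        have hjn : j < (T.length : Int) := by omega
        have hcol := muA_col T i hjn
        have hμ' : muA T i (j+1) < N := by omega
        have hw'len : (PySem.List.pySetD w i true).length = w.length :=
          PySem.List.length_pySetD w i true
        have hk'len : (PySem.List.pySetD k j true).length = k.length :=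
          PySem.List.length_pySetD k j true
        have hwi' : PySem.List.pyGetD (PySem.List.pySetD w i true) i true = true := by
          rw [PySem.List.pySetD_of_nonneg w true h0i,
            PySem.List.pyGetD_eq_getElem _ true h0i (by simp; omega)]
          exact List.getElem_set_self (by simp; omega)
        unfold check
        rw [checkF_succ, if_neg ht, if_neg hgt, if_neg hj, if_neg hi]
        -- re-fuel A's two recursive calls to the wrapped 'check'
        have hb1 : checkF (muA T i j) T s (t + PySem.List.pyGetD (PySem.List.pyGetD T i []) j 0) i (j+1)
              (PySem.List.pySetD w i true) (PySem.List.pySetD k j true)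
            = check T s (t + PySem.List.pyGetD (PySem.List.pyGetD T i []) j 0) i (j+1)
              (PySem.List.pySetD w i true) (PySem.List.pySetD k j true) :=
          checkF_irrel T s _ _ _ _ _ _ _ (by omega) (by omega)
        have hb2 : checkF (muA T i j) T s t i (j+1) w k = check T s t i (j+1) w k :=
          checkF_irrel T s _ _ _ _ _ _ _ (by omega) (by omega)
        rw [hb1, hb2]
        have IH2 : check T s t i (j+1) w k = check_alt T s t i (j+1) w k :=
          IH _ hμ' t i (j+1) w k le_rfl h0i (by omega) hw hk hT
        have IH1 : check T s (t + PySem.List.pyGetD (PySem.List.pyGetD T i []) j 0) i (j+1)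
              (PySem.List.pySetD w i true) (PySem.List.pySetD k j true)
            = check_alt T s (t + PySem.List.pyGetD (PySem.List.pyGetD T i []) j 0) i (j+1)
              (PySem.List.pySetD w i true) (PySem.List.pySetD k j true) :=
          IH _ hμ' _ i (j+1) _ _ le_rfl h0i (by omega) (by omega) (by omega) hT
        unfold check_alt
        rw [if_neg ht, if_neg hgt, if_neg hj,
          go_lt T s t i j w k ht hgt hin,
          tryCols_lt T s t i j w k hjn hin]
        rw [IH1, IH2,
          pick_eq T s _ i j _ _ hwi' hin,
          skip_eq T s t i j w k ht hgt hin]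
        by_cases hwrow : PySem.List.pyGetD w i true = false
        · rw [if_pos hwrow, if_pos hwrow]
          by_cases hkcol : PySem.List.pyGetD k j true = false
          · have hwk : PySem.List.pyGetD w i true = false ∧ PySem.List.pyGetD k j true = false :=
              ⟨hwrow, hkcol⟩
            rw [if_pos hwk, if_pos hkcol]
            by_cases ht2 : t + PySem.List.pyGetD (PySem.List.pyGetD T i []) j 0 = s
            · simp [ht2]
            · rw [if_neg ht2, if_neg ht2]
              by_cases hgt2 : t + PySem.List.pyGetD (PySem.List.pyGetD T i []) j 0 > s
              · rw [if_pos hgt2,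
                  if_neg (show ¬ ((t + PySem.List.pyGetD (PySem.List.pyGetD T i []) j 0 < s) ∧ _ = true) by
                    rintro ⟨hlt, -⟩; omega)]
                simp
              · rw [if_neg hgt2]
                have hlt2 : t + PySem.List.pyGetD (PySem.List.pyGetD T i []) j 0 < s := by omega
                by_cases hg2 : go T s (t + PySem.List.pyGetD (PySem.List.pyGetD T i []) j 0) (i+1) 0
                    (PySem.List.pySetD w i true) (PySem.List.pySetD k j true) = true
                · have hcond : (t + PySem.List.pyGetD (PySem.List.pyGetD T i []) j 0 < s) ∧
                      go T s (t + PySem.List.pyGetD (PySem.List.pyGetD T i []) j 0) (i+1) 0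
                        (PySem.List.pySetD w i true) (PySem.List.pySetD k j true) = true :=
                    ⟨hlt2, hg2⟩
                  rw [if_pos hcond]
                  simp [hg2]
                · rw [if_neg (show ¬ ((t + PySem.List.pyGetD (PySem.List.pyGetD T i []) j 0 < s) ∧ _ = true) by
                    rintro ⟨-, hgo⟩; exact hg2 hgo)]
                  have hgof : go T s (t + PySem.List.pyGetD (PySem.List.pyGetD T i []) j 0) (i+1) 0
                      (PySem.List.pySetD w i true) (PySem.List.pySetD k j true) = false := by
                    simpa using hg2
                  rw [hgof]
                  simp
          · rw [if_neg (show ¬ (PySem.List.pyGetD w i true = false ∧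
                PySem.List.pyGetD k j true = false) by rintro ⟨-, hc⟩; exact hkcol hc),
              if_neg hkcol]
            simp
        · rw [if_neg hwrow, if_neg hwrow,
            if_neg (show ¬ (PySem.List.pyGetD w i true = false ∧
              PySem.List.pyGetD k j true = false) by rintro ⟨hc, -⟩; exact hwrow hc)]
          simp

-- ===== VERDICT (by name: the statement is the Claim_ definition above) =====
theorem check_spec : Claim_equal_check := by
  intro T s n_s i j w k _ hpre
  unfold Spec_check
  rcases hpre with ht | hgt | hadj | ⟨h0i, h0j, hw, hk, hT⟩
  · unfold check; rw [checkF_succ, if_pos ht]; unfold check_alt; rw [if_pos ht]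
  · by_cases ht : n_s = s
    · unfold check; rw [checkF_succ, if_pos ht]; unfold check_alt; rw [if_pos ht]
    · unfold check; rw [checkF_succ, if_neg ht, if_pos hgt]
      unfold check_alt; rw [if_neg ht, if_pos hgt]
  · by_cases ht : n_s = s
    · unfold check; rw [checkF_succ, if_pos ht]; unfold check_alt; rw [if_pos ht]
    · by_cases hgt : n_s > s
      · unfold check; rw [checkF_succ, if_neg ht, if_pos hgt]
        unfold check_alt; rw [if_neg ht, if_pos hgt]
      · by_cases hj : (T.length : Int) ≤ j
        · rw [if_pos hj] at hadj
          unfold check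
          rw [checkF_succ, if_neg ht, if_neg hgt, if_pos hj, if_pos hadj]
          unfold check_alt
          rw [if_neg ht, if_neg hgt, if_pos hj, go_ge T s n_s (i+1) 0 w k ht hgt hadj]
        · rw [if_neg hj] at hadj
          unfold check
          rw [checkF_succ, if_neg ht, if_neg hgt, if_neg hj, if_pos hadj]
          unfold check_alt
          rw [if_neg ht, if_neg hgt, if_neg hj, go_ge T s n_s i j w k ht hgt hadj]
  · exact check_main T s (muA T i j) n_s i j w k le_rfl h0i h0j hw hk hT
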